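-- pv_equiv track=rewrite | github.com/Pranav4798/Python-DSA-Practice | Monotonic Stack/DSA Quest/1441_ArrayWithStack.py | StackArray
-- ===== SOURCE A (Python) =====
-- target = [1,3]
--
-- n = 3
--
-- def StackArray(target, n):
--     res = []
--     idx = 0
--
--     for i in range(1, n+1):
--         if idx == len(target):
--             break
--
--         res.append("Push")
--         if i == target[idx]:
--             idx += 1
--         else:
--             res.append("Pop")
--     return res
-- ===== SOURCE B (Python) =====
-- def StackArray(target, n):
--     res = []
--     i = 1
--     for t in target:
--         while i <= n and i != t:
--             res.append("Push")
--             res.append("Pop")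
--             i += 1
--         if i > n:
--             break
--         res.append("Push")
--         i += 1
--     return res
-- ===== Notes on version B (the rewrite author's own statement) =====
-- stated objective: alternative
-- what changed: B iterates over the target elements with a running counter and an inner while-loop emitting Push/Pop pairs, instead of A's single indexed scan over range(1,n+1) with an idx pointer into target.
import Mathlib
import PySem

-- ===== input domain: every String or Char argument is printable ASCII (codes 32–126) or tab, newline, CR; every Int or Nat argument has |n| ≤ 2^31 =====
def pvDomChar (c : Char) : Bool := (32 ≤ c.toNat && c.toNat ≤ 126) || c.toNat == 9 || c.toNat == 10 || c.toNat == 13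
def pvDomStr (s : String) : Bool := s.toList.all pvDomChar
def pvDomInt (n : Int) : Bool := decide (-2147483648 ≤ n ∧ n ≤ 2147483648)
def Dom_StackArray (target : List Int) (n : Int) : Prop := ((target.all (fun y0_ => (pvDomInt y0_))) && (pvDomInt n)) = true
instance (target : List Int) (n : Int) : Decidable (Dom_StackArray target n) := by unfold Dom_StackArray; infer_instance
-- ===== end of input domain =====

-- B: iterates over the target elements with a counter and an inner while-loop, instead of
-- A's single indexed scan over range(1, n+1) with an idx pointer; alternative decomposition, same cost.

-- ===== PORT A =====
-- A's for-loop over range(1, n+1) with early break, state (res, idx); res built by cons.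
-- target[idx] is guarded by 'idx ≠ len(target)' and idx only counts matches upward,
-- so the pyGetD default 0 is unreachable (exact on all admitted inputs).
def aLoop (target : List Int) : List Int → Int → List String
  | [], _ => []
  | i :: rest, idx =>
    if idx = (target.length : Int) then []
    else if i = PySem.List.pyGetD target idx 0 then
      "Push" :: aLoop target rest (idx + 1)
    else
      "Push" :: "Pop" :: aLoop target rest idx

def StackArray (target : List Int) (n : Int) : List String :=
  aLoop target (PySem.List.pyRange 1 (n + 1) 1) 0

-- ===== PORT B =====
-- inner while-loop: returns (ops emitted, final value of i)
def bInner (t n : Int) (i : Int) : List String × Int :=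
  if h : i ≤ n ∧ i ≠ t then
    let p := bInner t n (i + 1)
    ("Push" :: "Pop" :: p.1, p.2)
  else ([], i)
termination_by (n + 1 - i).toNat
decreasing_by omega

-- outer for-loop over the elements of target
def bOuter (n : Int) : List Int → Int → List String
  | [], _ => []
  | t :: ts, i =>
    let p := bInner t n i
    if n < p.2 then p.1
    else p.1 ++ "Push" :: bOuter n ts (p.2 + 1)

def StackArray_alt (target : List Int) (n : Int) : List String :=
  bOuter n target 1

-- ===== PRECONDITION & SPEC =====
def Spec_StackArray (target : List Int) (n : Int) (out : List String) : Prop := out = StackArray_alt target n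
instance (target : List Int) (n : Int) (out : List String) : Decidable (Spec_StackArray target n out) := by unfold Spec_StackArray; infer_instance

-- ===== CLAIM (what is proved, stated in full; the proofs are below) =====
def Claim_equal_StackArray : Prop := ∀ (target : List Int) (n : Int), Dom_StackArray target n → Spec_StackArray target n (StackArray target n)

-- ===== LEMMAS AND PROOFS =====

-- A's loop stops immediately once idx reaches len(target)
lemma aLoop_len (target : List Int) (is : List Int) :
    aLoop target is (target.length : Int) = [] := by
  cases is with
  | nil => rfl
  | cons i rest => simp [aLoop]

lemma bInner_stop (t n i : Int) (h : ¬ (i ≤ n ∧ i ≠ t)) : bInner t n i = ([], i) := by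
  rw [bInner]; simp [h]

lemma bInner_step (t n i : Int) (h : i ≤ n ∧ i ≠ t) :
    bInner t n i = ("Push" :: "Pop" :: (bInner t n (i + 1)).1, (bInner t n (i + 1)).2) := by
  rw [bInner]; simp [h]

-- B's outer loop: a skipped counter value emits one Push/Pop pair
lemma bOuter_step (n t i : Int) (ts : List Int) (h1 : i ≤ n) (h2 : i ≠ t) :
    bOuter n (t :: ts) i = "Push" :: "Pop" :: bOuter n (t :: ts) (i + 1) := by
  simp only [bOuter, bInner_step t n i ⟨h1, h2⟩]
  by_cases hc : n < (bInner t n (i + 1)).2 <;> simp [hc]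

-- key invariant: A's remaining scan from counter i with idx = |pre| over target = pre ++ ts
-- equals B's outer loop over the remaining targets ts from counter i
lemma key (ts : List Int) : ∀ (pre : List Int) (i n : Int),
    aLoop (pre ++ ts) (PySem.List.pyRange i (n + 1) 1) (pre.length : Int) = bOuter n ts i := by
  induction ts with
  | nil =>
    intro pre i n
    simp only [List.append_nil, bOuter]
    exact aLoop_len pre _
  | cons t ts ih =>
    intro pre i n
    obtain ⟨k, hkk⟩ : ∃ k : Nat, (n + 1 - i).toNat = k := ⟨_, rfl⟩
    induction k generalizing i with
      | zero =>
        have hni : n < i := by omega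
        have hr : PySem.List.pyRange i (n + 1) 1 = [] := by
          simp [PySem.List.pyRange_one, show (n + 1 - i).toNat = 0 by omega]
        rw [hr]
        simp only [bOuter, bInner_stop t n i (by omega)]
        simp [hni, aLoop]
      | succ k ihk =>
        have hin : i ≤ n := by omega
        have hr : PySem.List.pyRange i (n + 1) 1 = i :: PySem.List.pyRange (i + 1) (n + 1) 1 :=
          PySem.List.pyRange_one_cons (by omega)
        rw [hr]
        have hlen : ((pre.length : Int)) ≠ (((pre ++ t :: ts).length : Int)) := by
          simp; omega
        have hget : PySem.List.pyGetD (pre ++ t :: ts) (pre.length : Int) 0 = t := by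
          rw [PySem.List.pyGetD_natCast]
          simp [List.getD]
        by_cases hit : i = t
        · -- match: A advances idx, B emits Push and moves to next target
          simp only [aLoop, if_neg hlen, hget, hit]
          have : aLoop (pre ++ t :: ts) (PySem.List.pyRange (t + 1) (n + 1) 1)
              ((pre.length : Int) + 1) = bOuter n ts (t + 1) := by
            have := ih (pre ++ [t]) (t + 1) n
            simpa [List.append_assoc] using this
          rw [this]
          simp only [bOuter]
          rw [bInner_stop t n t (by simp)]
          simp [show ¬ n < t by omega]
        · -- skip: both emit Push/Pop and advance i
          simp only [aLoop, if_neg hlen, hget, if_neg hit]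
          rw [bOuter_step n t i ts hin hit]
          have := ihk (i + 1) (by omega)
          rw [this]

-- ===== VERDICT (by name: the statement is the Claim_ definition above) =====
theorem StackArray_spec : Claim_equal_StackArray := by
  intro target n _
  show StackArray target n = StackArray_alt target n
  have := key target [] 1 n
  simpa [StackArray, StackArray_alt] using this
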